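-- pv_equiv track=rewrite | github.com/aboghossian/pretty_print | pretty_print.py | one_line_cost
-- ===== SOURCE A (Python) =====
-- def one_line_cost(text, m):
--     cost_matrix = [[0 for i in range(len(text))] for j in range(len(text))]
--     for i in range(len(text)):
--         for j in range(i, len(text)):
--             cost = m - j + i - sum([len(x) for x in text[i:(j+1)]])
--             if cost < 0:
--                 cost = m**3
--             cost_matrix[i][j] = cost**3
--     return cost_matrix
-- ===== SOURCE B (Python) =====
-- def one_line_cost(text, m):
--     # Prefix sums of word lengths make each interval length an O(1) lookup.
--     n = len(text)
--     pre = [0]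
--     for w in text:
--         pre.append(pre[-1] + len(w))
--
--     def entry(i, j):
--         if j < i:
--             return 0
--         c = m - (j - i) - (pre[j + 1] - pre[i])
--         return (m ** 3 if c < 0 else c) ** 3
--
--     return [[entry(i, j) for j in range(n)] for i in range(n)]
-- ===== Notes on version B (the rewrite author's own statement) =====
-- stated objective: faster
-- what changed: B precomputes prefix sums of the word lengths once so each matrix entry is an O(1) formula, instead of A's per-entry slice-and-sum, and builds the matrix directly by comprehension instead of mutating a zero matrix.
import Mathlib
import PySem

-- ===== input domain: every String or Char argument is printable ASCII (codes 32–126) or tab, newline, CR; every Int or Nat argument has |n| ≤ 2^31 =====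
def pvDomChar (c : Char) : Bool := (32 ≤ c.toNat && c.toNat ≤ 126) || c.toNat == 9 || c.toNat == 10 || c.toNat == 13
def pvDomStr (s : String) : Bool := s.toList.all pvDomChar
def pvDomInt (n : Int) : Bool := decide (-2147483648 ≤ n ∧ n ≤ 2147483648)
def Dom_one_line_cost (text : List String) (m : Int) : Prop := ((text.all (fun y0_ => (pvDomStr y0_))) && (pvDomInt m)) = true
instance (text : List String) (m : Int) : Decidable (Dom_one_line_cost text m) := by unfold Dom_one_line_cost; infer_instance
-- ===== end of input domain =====

-- B replaces A's per-entry slice-and-sum by prefix sums of the word lengths and builds the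
-- matrix directly instead of mutating a zero matrix.

-- ===== PORT A =====
def one_line_cost (text : List String) (m : Int) : List (List Int) :=
  let n : Int := PySem.List.len text
  -- cost_matrix = [[0 for i in range(len(text))] for j in range(len(text))]
  let mat0 := (PySem.List.pyRange 0 n 1).map (fun _ => (PySem.List.pyRange 0 n 1).map (fun _ => (0 : Int)))
  (PySem.List.pyRange 0 n 1).foldl (fun mat i =>
    (PySem.List.pyRange i n 1).foldl (fun mat j =>
      let cost := m - j + i - ((PySem.List.slice text (some i) (some (j + 1))).map (fun x => PySem.Str.len x)).sum
      let cost := if cost < 0 then m ^ 3 else cost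
      -- cost_matrix[i][j] = cost**3
      PySem.List.pySetD mat i (PySem.List.pySetD (PySem.List.pyGetD mat i []) j (cost ^ 3))) mat) mat0

-- ===== PORT B =====
-- pre[-1] + len(w) appended per word builds the prefix sums
def pvPre (text : List String) : List Int :=
  text.foldl (fun acc w => acc ++ [PySem.List.pyGetD acc (-1) 0 + PySem.Str.len w]) [0]

def pvEntry (pre : List Int) (m : Int) (i j : Int) : Int :=
  if j < i then 0
  else
    let c := m - (j - i) - (PySem.List.pyGetD pre (j + 1) 0 - PySem.List.pyGetD pre i 0)
    (if c < 0 then m ^ 3 else c) ^ 3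

def one_line_cost_alt (text : List String) (m : Int) : List (List Int) :=
  let n : Int := PySem.List.len text
  let pre := pvPre text
  (PySem.List.pyRange 0 n 1).map (fun i => (PySem.List.pyRange 0 n 1).map (fun j => pvEntry pre m i j))

-- ===== PRECONDITION & SPEC =====
def Spec_one_line_cost (text : List String) (m : Int) (out : List (List Int)) : Prop := out = one_line_cost_alt text m
instance (text : List String) (m : Int) (out : List (List Int)) : Decidable (Spec_one_line_cost text m out) := by unfold Spec_one_line_cost; infer_instance

-- ===== CLAIM (what is proved, stated in full; the proofs are below) =====
def Claim_equal_one_line_cost : Prop := ∀ (text : List String) (m : Int), Dom_one_line_cost text m → Spec_one_line_cost text m (one_line_cost text m)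

-- ===== LEMMAS AND PROOFS =====

-- general getD/set facts specialised to this file

theorem pvGetD_eq {α : Type} (l : List α) (k : Nat) (d : α) (h : k < l.length) : l.getD k d = l[k] := by
  simp [List.getD_eq_getElem?_getD, List.getElem?_eq_getElem h]

theorem pvGetD_set {α : Type} (xs : List α) (i k : Nat) (v : α) (d : α) :
    (xs.set i v).getD k d = if i = k ∧ i < xs.length then v else xs.getD k d := by
  simp only [List.getD_eq_getElem?_getD, List.getElem?_set]
  by_cases h1 : i = k
  · subst h1
    by_cases h2 : i < xs.length
    · rw [if_pos rfl, if_pos h2, if_pos ⟨rfl, h2⟩]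
      rfl
    · rw [if_pos rfl, if_neg h2, if_neg (by omega), List.getElem?_eq_none (by omega)]
  · rw [if_neg h1, if_neg (fun hc => h1 hc.1)]

-- prefix sums: characterisation of pvPre

def pvLenSum (text : List String) (k : Nat) : Int := ((text.take k).map (fun x => PySem.Str.len x)).sum

def pvScan (s : Int) : List String → List Int
  | [] => []
  | w :: t => (s + PySem.Str.len w) :: pvScan (s + PySem.Str.len w) t

theorem pvPre_fold (t : List String) : ∀ (acc : List Int) (s : Int),
    PySem.List.pyGetD acc (-1) 0 = s →
    t.foldl (fun acc w => acc ++ [PySem.List.pyGetD acc (-1) 0 + PySem.Str.len w]) acc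
      = acc ++ pvScan s t := by
  induction t with
  | nil => intro acc s _; simp [pvScan]
  | cons w t ih =>
    intro acc s h
    simp only [List.foldl_cons, pvScan, h]
    rw [ih (acc ++ [s + PySem.Str.len w]) (s + PySem.Str.len w)
        (PySem.List.pyGetD_neg_one_append_singleton acc (s + PySem.Str.len w) 0)]
    simp

theorem pvPre_eq (text : List String) : pvPre text = 0 :: pvScan 0 text := by
  unfold pvPre
  rw [pvPre_fold text [0] 0 (by rfl)]
  rfl

theorem pvScan_getD : ∀ (t : List String) (s : Int) (k : Nat), k ≤ t.length →
    (s :: pvScan s t).getD k 0 = s + pvLenSum t k := by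
  intro t
  induction t with
  | nil =>
    intro s k hk
    have : k = 0 := by simpa using hk
    subst this; simp [pvLenSum]
  | cons w t ih =>
    intro s k hk
    cases k with
    | zero => simp [pvLenSum]
    | succ k' =>
      have hk' : k' ≤ t.length := by simpa using hk
      show (pvScan s (w :: t)).getD k' 0 = _
      simp only [pvScan]
      rw [show ((s + PySem.Str.len w) :: pvScan (s + PySem.Str.len w) t).getD k' 0
            = (s + PySem.Str.len w) + pvLenSum t k' from ih (s + PySem.Str.len w) k' hk']
      simp only [pvLenSum, List.take_succ_cons, List.map_cons, List.sum_cons]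
      ring

theorem pvPre_getD (text : List String) (k : Nat) (hk : k ≤ text.length) :
    PySem.List.pyGetD (pvPre text) ((k : Nat) : Int) 0 = pvLenSum text k := by
  rw [PySem.List.pyGetD_natCast, pvPre_eq]
  exact (pvScan_getD text 0 k hk).trans (by ring)

theorem pvInterval_sum (text : List String) (a b : Nat) (hab : a ≤ b) :
    ((List.take (b - a) (List.drop a text)).map (fun x => PySem.Str.len x)).sum
      = pvLenSum text b - pvLenSum text a := by
  have h : text.take b = text.take a ++ (text.drop a).take (b - a) := by
    conv_lhs => rw [show b = a + (b - a) by omega]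
    exact List.take_add
  unfold pvLenSum
  rw [h, List.map_append, List.sum_append]
  ring

-- fold of in-place sets over an increasing index range, value read from the current list

theorem pvFoldSetF_length {α : Type} (d : α) (F : Nat → α → α) :
    ∀ (c a : Nat) (xs : List α),
      ((List.range' a c).foldl (fun ys i => ys.set i (F i (ys.getD i d))) xs).length = xs.length := by
  intro c
  induction c with
  | zero => intro a xs; simp
  | succ c ih =>
    intro a xs
    rw [List.range'_succ, List.foldl_cons, ih, List.length_set]

theorem pvFoldSetF_getD {α : Type} (d : α) (F : Nat → α → α) :
    ∀ (c a : Nat) (xs : List α) (k : Nat),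
      ((List.range' a c).foldl (fun ys i => ys.set i (F i (ys.getD i d))) xs).getD k d =
        if a ≤ k ∧ k < a + c ∧ k < xs.length then F k (xs.getD k d) else xs.getD k d := by
  intro c
  induction c with
  | zero =>
    intro a xs k
    rw [List.range'_zero, List.foldl_nil, if_neg (by omega)]
  | succ c ih =>
    intro a xs k
    rw [List.range'_succ, List.foldl_cons, ih, List.length_set, pvGetD_set]
    by_cases hk : a = k
    · subst hk
      by_cases hl : a < xs.length
      · rw [if_neg (by omega), if_pos ⟨rfl, hl⟩, if_pos ⟨le_refl a, by omega, hl⟩]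
      · rw [if_neg (by omega), if_neg (by omega), if_neg (by omega)]
    · by_cases hin : a + 1 ≤ k ∧ k < a + 1 + c ∧ k < xs.length
      · rw [if_pos hin, if_neg (by omega), if_pos (by omega)]
      · rw [if_neg hin, if_neg (by omega), if_neg (by omega)]

-- same, with a value not depending on the current list (row-level sets)

theorem pvFoldSetV_length {α : Type} (v : Nat → α) :
    ∀ (c a : Nat) (xs : List α),
      ((List.range' a c).foldl (fun ys i => ys.set i (v i)) xs).length = xs.length := by
  intro c
  induction c with
  | zero => intro a xs; simp
  | succ c ih =>
    intro a xs
    rw [List.range'_succ, List.foldl_cons, ih, List.length_set]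

theorem pvFoldSetV_getD {α : Type} (d : α) (v : Nat → α) :
    ∀ (c a : Nat) (xs : List α) (k : Nat),
      ((List.range' a c).foldl (fun ys i => ys.set i (v i)) xs).getD k d =
        if a ≤ k ∧ k < a + c ∧ k < xs.length then v k else xs.getD k d := by
  intro c
  induction c with
  | zero =>
    intro a xs k
    rw [List.range'_zero, List.foldl_nil, if_neg (by omega)]
  | succ c ih =>
    intro a xs k
    rw [List.range'_succ, List.foldl_cons, ih, List.length_set, pvGetD_set]
    by_cases hk : a = k
    · subst hk
      by_cases hl : a < xs.length
      · rw [if_neg (by omega), if_pos ⟨rfl, hl⟩, if_pos ⟨le_refl a, by omega, hl⟩]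
      · rw [if_neg (by omega), if_neg (by omega), if_neg (by omega)]
    · by_cases hin : a + 1 ≤ k ∧ k < a + 1 + c ∧ k < xs.length
      · rw [if_pos hin, if_pos (by omega)]
      · rw [if_neg hin, if_neg (by omega), if_neg (by omega)]

-- A's per-entry value and final row

def pvValA (text : List String) (m : Int) (i j : Int) : Int :=
  let cost := m - j + i - ((PySem.List.slice text (some i) (some (j + 1))).map (fun x => PySem.Str.len x)).sum
  (if cost < 0 then m ^ 3 else cost) ^ 3

def pvRowF (text : List String) (m : Int) (n a : Nat) (row : List Int) : List Int :=
  (List.range' a (n - a)).foldl (fun row t => row.set t (pvValA text m ((a : Nat) : Int) ((t : Nat) : Int))) row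

-- A's inner loop over j only rewrites row a

theorem pvInnerAux (a : Nat) (v : Int → Int) :
    ∀ (ks : List Nat) (mat : List (List Int)),
      ks.foldl (fun mat k =>
          PySem.List.pySetD mat ((a : Nat) : Int)
            (PySem.List.pySetD (PySem.List.pyGetD mat ((a : Nat) : Int) [])
              (((a : Nat) : Int) + ((k : Nat) : Int)) (v (((a : Nat) : Int) + ((k : Nat) : Int))))) mat
        = mat.set a (ks.foldl (fun row k => row.set (a + k) (v (((a : Nat) : Int) + ((k : Nat) : Int)))) (mat.getD a [])) := by
  intro ks
  induction ks with
  | nil =>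
    intro mat
    by_cases h : a < mat.length
    · rw [List.foldl_nil, List.foldl_nil, pvGetD_eq _ _ _ h, List.set_getElem_self]
    · rw [List.foldl_nil, List.foldl_nil, List.set_eq_of_length_le (by omega)]
  | cons k ks ih =>
    intro mat
    rw [List.foldl_cons, List.foldl_cons]
    have hcast : ((a : Nat) : Int) + ((k : Nat) : Int) = (((a + k : Nat) : Nat) : Int) := by push_cast; ring
    rw [hcast, PySem.List.pySetD_natCast, PySem.List.pyGetD_natCast, PySem.List.pySetD_natCast, ih, List.set_set]
    congr 1
    by_cases h : a < mat.length
    · rw [pvGetD_set, if_pos ⟨rfl, h⟩]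
    · rw [pvGetD_set, if_neg (by omega), List.getD_eq_default _ _ (by omega)]
      rfl

theorem pvInnerToSet (text : List String) (m : Int) (a n : Nat) (mat : List (List Int)) :
    (PySem.List.pyRange ((a : Nat) : Int) ((n : Nat) : Int) 1).foldl (fun mat j =>
        PySem.List.pySetD mat ((a : Nat) : Int)
          (PySem.List.pySetD (PySem.List.pyGetD mat ((a : Nat) : Int) []) j
            ((if m - j + ((a : Nat) : Int) - (List.map (fun x => PySem.Str.len x)
                  (PySem.List.slice text (some ((a : Nat) : Int)) (some (j + 1)))).sum < 0 then m ^ 3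
              else m - j + ((a : Nat) : Int) - (List.map (fun x => PySem.Str.len x)
                  (PySem.List.slice text (some ((a : Nat) : Int)) (some (j + 1)))).sum) ^ 3))) mat
      = mat.set a (pvRowF text m n a (mat.getD a [])) := by
  unfold pvRowF
  rw [PySem.List.pyRange_one, show (((n : Nat) : Int) - ((a : Nat) : Int)).toNat = n - a by omega,
      List.foldl_map, List.range'_eq_map_range, List.foldl_map]
  refine (pvInnerAux a (fun j => pvValA text m ((a : Nat) : Int) j) (List.range (n - a)) mat).trans ?_
  simp only [Nat.cast_add]

-- the per-entry values agree (prefix-sum difference = slice sum)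

theorem pvVal_eq_entry (text : List String) (m : Int) (k q : Nat) (hq : q < text.length) (hkq : k ≤ q) :
    pvValA text m ((k : Nat) : Int) ((q : Nat) : Int) = pvEntry (pvPre text) m ((k : Nat) : Int) ((q : Nat) : Int) := by
  have hcast : ((q : Nat) : Int) + 1 = (((q + 1 : Nat) : Nat) : Int) := by push_cast; ring
  simp only [pvValA, pvEntry]
  rw [if_neg (show ¬(((q : Nat) : Int) < ((k : Nat) : Int)) by exact_mod_cast not_lt.mpr hkq)]
  rw [hcast, PySem.List.slice_natCast, pvPre_getD text (q + 1) (by omega), pvPre_getD text k (by omega)]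
  rw [pvInterval_sum text k (q + 1) (by omega)]
  rw [show m - ((q : Nat) : Int) + ((k : Nat) : Int) - (pvLenSum text (q + 1) - pvLenSum text k)
        = m - (((q : Nat) : Int) - ((k : Nat) : Int)) - (pvLenSum text (q + 1) - pvLenSum text k) by ring]

-- row k of A's final matrix equals row k of B's

theorem pvRow_eq (text : List String) (m : Int) (k : Nat) (hk : k < text.length) :
    pvRowF text m text.length k (List.map (fun _ => (0 : Int)) (List.range text.length))
      = List.map (fun q => pvEntry (pvPre text) m ((k : Nat) : Int) ((q : Nat) : Int)) (List.range text.length) := by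
  have hrow0 : (List.map (fun _ => (0 : Int)) (List.range text.length)).length = text.length := by simp
  apply List.ext_getElem
  · unfold pvRowF
    rw [pvFoldSetV_length]
    simp
  · intro q hq1 hq2
    have hq : q < text.length := by simpa using hq2
    rw [List.getElem_map, List.getElem_range]
    rw [← pvGetD_eq _ q 0 hq1]
    unfold pvRowF
    rw [pvFoldSetV_getD]
    by_cases h : k ≤ q
    · rw [if_pos ⟨h, by omega, by rw [hrow0]; exact hq⟩]
      exact pvVal_eq_entry text m k q hq h
    · rw [if_neg (fun hc => h hc.1)]
      rw [pvGetD_eq _ _ _ (by rw [hrow0]; exact hq), List.getElem_map]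
      simp only [pvEntry]
      rw [if_pos (show ((q : Nat) : Int) < ((k : Nat) : Int) by exact_mod_cast Nat.lt_of_not_le h)]

-- the main equality

theorem pvMain (text : List String) (m : Int) :
    one_line_cost text m = one_line_cost_alt text m := by
  unfold one_line_cost one_line_cost_alt
  simp only [PySem.List.len_eq, PySem.List.pyRange_zero_natCast, List.foldl_map, List.map_map,
    Function.comp_def]
  refine Eq.trans (PySem.List.foldl_congr_mem' _ _
      (fun (mat : List (List Int)) (a : Nat) => mat.set a (pvRowF text m text.length a (mat.getD a []))) _
      (fun a _ mat => pvInnerToSet text m a text.length mat)) ?_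
  apply List.ext_getElem
  · rw [List.range_eq_range', pvFoldSetF_length]
    simp
  · intro k h1 h2
    have hk : k < text.length := by simpa using h2
    rw [List.getElem_map, List.getElem_range]
    rw [← pvGetD_eq _ k [] h1, List.range_eq_range', pvFoldSetF_getD, ← List.range_eq_range']
    rw [if_pos ⟨Nat.zero_le k, by omega, by simpa using hk⟩]
    rw [pvGetD_eq _ k [] (by simpa using hk), List.getElem_map]
    exact pvRow_eq text m k hk

-- ===== VERDICT (by name: the statement is the Claim_ definition above) =====
theorem one_line_cost_spec : Claim_equal_one_line_cost := by
  intro text m _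
  unfold Spec_one_line_cost
  exact pvMain text m
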